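-- pv_equiv track=rewrite | github.com/grantsrb/mas | tests/test_causal_models.py | is_correct_sequence
-- ===== SOURCE A (Python) =====
-- def is_correct_sequence(seq, expected_count):
--     demo_count = 0
--     resp_count = 0
--     triggered = False
--     for token in seq:
--         if token in {"D0", "D1", "D2", "D"}:
--             demo_count += 1
--             if triggered:
--                 return False
--         if token == "T":
--             triggered = True
--         if token == "R":
--             if not triggered:
--                 return False
--             resp_count += 1
--     if seq[-1] != "E":
--         return False
--     return resp_count == expected_count and demo_count == expected_count
-- ===== SOURCE B (Python) =====
-- def is_correct_sequence(seq, expected_count):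
--     if seq[-1] != "E":
--         return False
--     demos = ("D0", "D1", "D2", "D")
--     # split the sequence at the first trigger token "T"
--     before = []
--     rest = []
--     it = iter(seq)
--     for t in it:
--         if t == "T":
--             rest = [t] + list(it)
--             break
--         before.append(t)
--     # no response before the trigger, no demo token at/after the trigger
--     if "R" in before or any(t in demos for t in rest):
--         return False
--     demo_count = sum(t in demos for t in seq)
--     resp_count = sum(t == "R" for t in seq)
--     return demo_count == expected_count and resp_count == expected_count
-- ===== Notes on version B (the rewrite author's own statement) =====
-- stated objective: alternative
-- what changed: A's single stateful scan with a 'triggered' flag and early returns is replaced by a pivot decomposition: split the list at the first "T", check the two halves for misplaced "R"/demo tokens with membership/any, and compute the two counts by separate sums.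
import Mathlib
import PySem

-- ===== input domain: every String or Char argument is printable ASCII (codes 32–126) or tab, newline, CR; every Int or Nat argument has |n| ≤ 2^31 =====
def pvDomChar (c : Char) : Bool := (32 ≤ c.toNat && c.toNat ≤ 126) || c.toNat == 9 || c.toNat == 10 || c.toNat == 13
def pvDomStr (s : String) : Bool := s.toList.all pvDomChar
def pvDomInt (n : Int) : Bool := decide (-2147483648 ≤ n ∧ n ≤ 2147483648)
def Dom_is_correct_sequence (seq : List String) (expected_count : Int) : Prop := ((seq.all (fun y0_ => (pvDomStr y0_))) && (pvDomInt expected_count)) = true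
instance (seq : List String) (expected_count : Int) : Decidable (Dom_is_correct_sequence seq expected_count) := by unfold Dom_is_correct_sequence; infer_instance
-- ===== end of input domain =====

-- B replaces A's single stateful scan (triggered flag, early returns) by a pivot decomposition:
-- split at the first "T", validate the two halves, then count with separate sums (objective: alternative).

-- ===== PORT A =====
-- the for-loop of A with its early 'return False' as Option: none = early False,
-- some (demo_count, resp_count) = loop finished
def pvLoopA : List String → Int → Int → Bool → Option (Int × Int)
  | [], d, r, _ => some (d, r)
  | t :: ts, d, r, trig =>
    let isDemo := t == "D0" || t == "D1" || t == "D2" || t == "D"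
    let d' := if isDemo then d + 1 else d
    if isDemo && trig then none
    else
      let trig' := if t == "T" then true else trig
      if t == "R" then
        if !trig' then none else pvLoopA ts d' (r + 1) trig'
      else pvLoopA ts d' r trig'

def is_correct_sequence (seq : List String) (expected_count : Int) : Bool :=
  match pvLoopA seq 0 0 false with
  | none => false
  | some (d, r) =>
    match PySem.List.pyGet? seq (-1) with
    | none => false   -- Python raises IndexError here; excluded by Pre_
    | some last =>
      if last != "E" then false
      else decide (r = expected_count) && decide (d = expected_count)

-- ===== PORT B =====
def pvIsDemo (t : String) : Bool := t == "D0" || t == "D1" || t == "D2" || t == "D"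

-- Source B's for-loop over the iterator: returns (before, rest)
def pvSplitB : List String → List String × List String
  | [] => ([], [])
  | t :: ts =>
    if t == "T" then ([], t :: ts)
    else
      let (b, rest) := pvSplitB ts
      (t :: b, rest)

def is_correct_sequence_alt (seq : List String) (expected_count : Int) : Bool :=
  -- (expected_count is used in the success branch below)
  match PySem.List.pyGet? seq (-1) with
  | none => false   -- Python raises IndexError here; excluded by Pre_
  | some last =>
    if last != "E" then false
    else
      let p := pvSplitB seq
      if p.1.contains "R" || p.2.any pvIsDemo then false
      else
        let demo_count : Int := seq.countP pvIsDemo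
        let resp_count : Int := seq.countP (fun t => t == "R")
        decide (demo_count = expected_count) && decide (resp_count = expected_count)

-- ===== PRECONDITION & SPEC =====
-- Pre_ excludes only the empty list, on which both Pythons raise IndexError (seq[-1]).
def Pre_is_correct_sequence (seq : List String) (expected_count : Int) : Prop := seq ≠ []
instance (seq : List String) (expected_count : Int) : Decidable (Pre_is_correct_sequence seq expected_count) := by unfold Pre_is_correct_sequence; infer_instance
def pvWitness_is_correct_sequence : List String × Int := (["D0", "T", "R", "E"], 1)

def Spec_is_correct_sequence (seq : List String) (expected_count : Int) (out : Bool) : Prop := out = is_correct_sequence_alt seq expected_count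
instance (seq : List String) (expected_count : Int) (out : Bool) : Decidable (Spec_is_correct_sequence seq expected_count out) := by unfold Spec_is_correct_sequence; infer_instance

-- ===== CLAIM (what is proved, stated in full; the proofs are below) =====
def Claim_equal_is_correct_sequence : Prop := ∀ (seq : List String) (expected_count : Int), Dom_is_correct_sequence seq expected_count → Pre_is_correct_sequence seq expected_count → Spec_is_correct_sequence seq expected_count (is_correct_sequence seq expected_count)

-- ===== LEMMAS AND PROOFS =====

-- with the trigger already seen, A's loop fails iff a demo token remains, else adds the R-count
theorem pvLoopA_true (l : List String) : ∀ d r : Int,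
    pvLoopA l d r true =
      if l.any pvIsDemo then none else some (d, r + (l.countP (fun t => t == "R") : Int)) := by
  induction l with
  | nil => intro d r; simp [pvLoopA]
  | cons t ts ih =>
    intro d r
    by_cases hd : pvIsDemo t = true
    · simp only [pvIsDemo, Bool.or_eq_true, beq_iff_eq] at hd
      rcases hd with ((h | h) | h) | h <;> subst h <;> simp [pvLoopA, pvIsDemo]
    · simp only [pvIsDemo, Bool.or_eq_true, beq_iff_eq, not_or] at hd
      obtain ⟨⟨⟨h0, h1⟩, h2⟩, h3⟩ := hd
      by_cases hR : t = "R"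
      · subst hR
        simp [pvLoopA, pvIsDemo, ih]
        split
        · rfl
        · ring_nf
      · simp [pvLoopA, pvIsDemo, h0, h1, h2, h3, hR, ih]

-- before the trigger, A's loop fails iff B's split finds an R before or a demo at/after the
-- first "T"; on success it adds the whole-list counts
theorem pvLoopA_false (l : List String) : ∀ d r : Int,
    pvLoopA l d r false =
      if (pvSplitB l).1.contains "R" || (pvSplitB l).2.any pvIsDemo then none
      else some (d + (l.countP pvIsDemo : Int), r + (l.countP (fun t => t == "R") : Int)) := by
  induction l with
  | nil => intro d r; simp [pvLoopA, pvSplitB]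
  | cons t ts ih =>
    intro d r
    by_cases hT : t = "T"
    · subst hT
      simp [pvLoopA, pvSplitB, pvLoopA_true, pvIsDemo]
      split
      · rfl
      · rename_i hnd
        have hz : ts.countP pvIsDemo = 0 := by
          rw [List.countP_eq_zero]
          intro a ha hcon
          exact hnd ⟨a, ha, by simpa [pvIsDemo] using hcon⟩
        simp [pvIsDemo] at hz
        simp
        intro a ha
        obtain ⟨⟨u0, u1⟩, u2⟩ := (hz a ha).1
        simp [pvIsDemo, u0, u1, u2, (hz a ha).2]
    · by_cases hd : pvIsDemo t = true
      · have hR : t ≠ "R" := by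
          simp only [pvIsDemo, Bool.or_eq_true, beq_iff_eq] at hd
          rcases hd with ((h | h) | h) | h <;> subst h <;> decide
        have hds : (t == "D0" || t == "D1" || t == "D2" || t == "D") = true := hd
        simp [pvLoopA, pvSplitB, hds, hT, hR, Ne.symm hR, ih, pvIsDemo]
        split
        · rfl
        · simp
          omega
      · simp only [pvIsDemo, Bool.or_eq_true, beq_iff_eq, not_or] at hd
        obtain ⟨⟨⟨h0, h1⟩, h2⟩, h3⟩ := hd
        by_cases hR : t = "R"
        · subst hR
          simp [pvLoopA, pvSplitB]
        · simp [pvLoopA, pvSplitB, pvIsDemo, h0, h1, h2, h3, hT, hR, Ne.symm hR, ih]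

-- ===== VERDICT (by name: the statement is the Claim_ definition above) =====
theorem is_correct_sequence_spec : Claim_equal_is_correct_sequence := by
  intro seq c _ hpre
  unfold Spec_is_correct_sequence is_correct_sequence is_correct_sequence_alt
  rw [pvLoopA_false]
  cases hg : PySem.List.pyGet? seq (-1) with
  | none =>
    exfalso
    rw [PySem.List.pyGet?_neg_one] at hg
    cases seq with
    | nil => exact hpre rfl
    | cons a l => simp [List.getLast?] at hg
  | some last =>
    by_cases hguard : ((pvSplitB seq).1.contains "R" || (pvSplitB seq).2.any pvIsDemo) = true
    · simp only [hguard, if_true]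
      by_cases hE : last = "E" <;> simp [hE]
    · simp only [Bool.not_eq_true] at hguard
      simp only [hguard, Bool.false_eq_true, if_false, zero_add]
      by_cases hE : last = "E"
      · subst hE
        simp only [bne_self_eq_false, Bool.false_eq_true, if_false]
        by_cases h1 : ((seq.countP pvIsDemo : Int) = c) <;>
          by_cases h2 : ((seq.countP (fun t => t == "R") : Int) = c) <;> simp [h1, h2]
      · simp [hE]
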